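-- pv_equiv track=rewrite | github.com/dnjs2721/Algorithm_Python | Programmers/n^2 배열 자르기.py | solution
-- ===== SOURCE A (Python) =====
-- def solution(n, left, right):
--     answer = []
--     for idx in range(left, right + 1):
--         y, x = idx//n, idx % n
--         if y >= x:
--             answer.append(y + 1)
--         elif y < x:
--             answer.append(x + 1)
--
--     return answer
-- ===== SOURCE B (Python) =====
-- def solution(n, left, right):
--     if left > right:
--         return []
--     answer = []
--     r0, r1 = left // n, right // n
--     for r in range(r0, r1 + 1):
--         lo = left - r * n if r == r0 else 0
--         hi = right - r * n if r == r1 else n - 1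
--         # cells lo..hi of row r hold max(r, c) + 1: a constant run of r+1, then an increasing tail
--         answer.extend([r + 1] * (min(r, hi) - lo + 1))
--         answer.extend(range(max(r + 1, lo) + 1, hi + 2))
--     return answer
-- ===== Notes on version B (the rewrite author's own statement) =====
-- stated objective: alternative
-- what changed: B iterates over the rows of the slice and emits each row's cells as one constant run [r+1]*k plus one increasing range, instead of computing idx//n, idx%n and a comparison for every flat index as A does.
-- outside the precondition, e.g. on solution(-2, 0, 3): A returns [1, 0, 1, 0], B returns []
import Mathlib
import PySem

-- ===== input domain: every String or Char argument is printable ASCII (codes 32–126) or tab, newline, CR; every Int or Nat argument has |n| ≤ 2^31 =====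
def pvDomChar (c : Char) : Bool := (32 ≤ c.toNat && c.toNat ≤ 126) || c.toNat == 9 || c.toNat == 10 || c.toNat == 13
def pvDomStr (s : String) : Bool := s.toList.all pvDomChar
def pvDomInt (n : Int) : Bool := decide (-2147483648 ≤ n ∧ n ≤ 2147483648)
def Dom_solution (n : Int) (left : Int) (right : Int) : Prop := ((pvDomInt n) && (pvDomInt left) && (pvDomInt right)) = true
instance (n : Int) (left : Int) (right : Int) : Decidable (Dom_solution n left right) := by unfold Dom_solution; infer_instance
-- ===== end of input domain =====

-- B builds the answer row by row as a constant run plus an increasing tail instead of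
-- computing max(idx//n, idx%n)+1 per index (objective: alternative decomposition).

-- ===== PORT A =====
def solution (n : Int) (left : Int) (right : Int) : List Int :=
  (PySem.List.pyRange left (right + 1) 1).foldl (fun answer idx =>
    let y := PySem.Int.floordiv idx n
    let x := PySem.Int.mod idx n
    if y ≥ x then answer ++ [y + 1]
    else if y < x then answer ++ [x + 1]
    else answer) []

-- ===== PORT B =====
def solution_alt (n : Int) (left : Int) (right : Int) : List Int :=
  if left > right then []
  else
    let r0 := PySem.Int.floordiv left n
    let r1 := PySem.Int.floordiv right n
    (PySem.List.pyRange r0 (r1 + 1) 1).foldl (fun answer r =>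
      let lo := if r = r0 then left - r * n else 0
      let hi := if r = r1 then right - r * n else n - 1
      answer ++ List.replicate (min r hi - lo + 1).toNat (r + 1)
             ++ PySem.List.pyRange (max (r + 1) lo + 1) (hi + 2) 1) []

-- ===== PRECONDITION & SPEC =====
-- Pre_ requires n ≥ 1 (the n×n array of the task only exists for positive n) unless the index
-- range is empty (right < left, where both return []): for n ≤ -1 with a nonempty range A still
-- returns values driven by Python's negative-divisor floor semantics, and for n = 0 A raises
-- ZeroDivisionError there.
def Pre_solution (n : Int) (left : Int) (right : Int) : Prop := 1 ≤ n ∨ right < left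
instance (n : Int) (left : Int) (right : Int) : Decidable (Pre_solution n left right) := by unfold Pre_solution; infer_instance
def pvWitness_solution : Int × Int × Int := (3, 2, 5)
def Spec_solution (n : Int) (left : Int) (right : Int) (out : List Int) : Prop := out = solution_alt n left right
instance (n : Int) (left : Int) (right : Int) (out : List Int) : Decidable (Spec_solution n left right out) := by unfold Spec_solution; infer_instance

-- ===== CLAIM (what is proved, stated in full; the proofs are below) =====
def Claim_equal_solution : Prop := ∀ (n : Int) (left : Int) (right : Int), Dom_solution n left right → Pre_solution n left right → Spec_solution n left right (solution n left right)

-- ===== LEMMAS AND PROOFS =====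

-- the cell value of a flat index
def pvCell (n idx : Int) : Int := max (PySem.Int.floordiv idx n) (PySem.Int.mod idx n) + 1

-- one row's contribution in B, with the first/last-row flags made explicit
def pvRow (n left right r0 r1 r : Int) : List Int :=
  let lo := if r = r0 then left - r * n else 0
  let hi := if r = r1 then right - r * n else n - 1
  List.replicate (min r hi - lo + 1).toNat (r + 1)
    ++ PySem.List.pyRange (max (r + 1) lo + 1) (hi + 2) 1

lemma solutionA_eq_map (n left right : Int) :
    solution n left right
      = (PySem.List.pyRange left (right + 1) 1).map (pvCell n) := by
  unfold solution
  have hbody : (fun (answer : List Int) (idx : Int) =>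
      let y := PySem.Int.floordiv idx n
      let x := PySem.Int.mod idx n
      if y ≥ x then answer ++ [y + 1]
      else if y < x then answer ++ [x + 1]
      else answer) = fun answer idx => answer ++ [pvCell n idx] := by
    funext answer idx
    simp only [pvCell]
    split_ifs with h1 h2 <;> simp <;> omega
  rw [hbody, PySem.List.foldl_append_singleton_eq_map]
  simp

lemma solutionB_eq_flatMap (n left right : Int) (h : left ≤ right) :
    solution_alt n left right
      = (PySem.List.pyRange (PySem.Int.floordiv left n) (PySem.Int.floordiv right n + 1) 1).flatMap
          (pvRow n left right (PySem.Int.floordiv left n) (PySem.Int.floordiv right n)) := by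
  unfold solution_alt
  rw [if_neg (by omega)]
  simp only [List.append_assoc]
  rw [PySem.List.foldl_append_eq_flatMap]
  rfl

-- a contiguous run of one row's cells: a constant block then an increasing tail
lemma rowRun (r : Int) : ∀ (k : Nat) (lo hi : Int), (hi + 1 - lo).toNat = k →
    (PySem.List.pyRange lo (hi + 1) 1).map (fun c => max r c + 1)
      = List.replicate (min r hi - lo + 1).toNat (r + 1)
        ++ PySem.List.pyRange (max (r + 1) lo + 1) (hi + 2) 1 := by
  intro k
  induction k with
  | zero =>
    intro lo hi hk
    have h1 : hi + 1 ≤ lo := by omega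
    rw [PySem.List.pyRange_one_eq_nil h1, PySem.List.pyRange_one_eq_nil (by omega)]
    have : (min r hi - lo + 1).toNat = 0 := by omega
    simp [this]
  | succ k ih =>
    intro lo hi hk
    have hlo : lo ≤ hi := by omega
    rw [PySem.List.pyRange_one_cons (by omega : lo < hi + 1), List.map_cons,
        ih (lo + 1) hi (by omega)]
    by_cases hr : lo ≤ r
    · have hmax : max r lo = r := by omega
      have hcnt : (min r hi - lo + 1).toNat = (min r hi - (lo + 1) + 1).toNat + 1 := by omega
      have hmax2 : max (r + 1) (lo + 1) = max (r + 1) lo := by omega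
      rw [hmax, hcnt, hmax2]
      simp [List.replicate_succ]
    · have hmax : max r lo = lo := by omega
      have hc1 : (min r hi - lo + 1).toNat = 0 := by omega
      have hc2 : (min r hi - (lo + 1) + 1).toNat = 0 := by omega
      have hm1 : max (r + 1) lo = lo := by omega
      have hm2 : max (r + 1) (lo + 1) = lo + 1 := by omega
      rw [hmax, hc1, hc2, hm1, hm2]
      simp [PySem.List.pyRange_one_cons (by omega : lo + 1 < hi + 2)]

lemma pyRange_shift (a b t : Int) :
    PySem.List.pyRange a b 1 = (PySem.List.pyRange (a - t) (b - t) 1).map (· + t) := by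
  rw [PySem.List.pyRange_one, PySem.List.pyRange_one, List.map_map]
  have : (b - t - (a - t)).toNat = (b - a).toNat := by omega
  rw [this]
  apply List.map_congr_left
  intro k _
  simp; omega

lemma cell_on_row (n r c : Int) (hn : 1 ≤ n) (h0 : 0 ≤ c) (h1 : c < n) :
    pvCell n (c + r * n) = max r c + 1 := by
  have hdiv : PySem.Int.floordiv (c + r * n) n = r := by
    rw [PySem.Int.floordiv_eq_iff_of_pos (by omega)]
    constructor <;> nlinarith
  have hmod : PySem.Int.mod (c + r * n) n = c := by
    have := PySem.Int.floordiv_mul_add_mod (c + r * n) n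
    rw [hdiv] at this; omega
  simp [pvCell, hdiv, hmod]

-- one row's slice of the flat index range maps to pvRow
lemma rowPiece (n left right r0 r1 r lo hi : Int) (hn : 1 ≤ n)
    (hlo : lo = (if r = r0 then left - r * n else 0))
    (hhi : hi = (if r = r1 then right - r * n else n - 1))
    (h0 : 0 ≤ lo) (h1 : hi < n) :
    (PySem.List.pyRange (lo + r * n) (hi + 1 + r * n) 1).map (pvCell n)
      = pvRow n left right r0 r1 r := by
  rw [pyRange_shift (lo + r * n) (hi + 1 + r * n) (r * n)]
  have e1 : lo + r * n - r * n = lo := by ring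
  have e2 : hi + 1 + r * n - r * n = hi + 1 := by ring
  rw [e1, e2, List.map_map]
  have hmapeq : (PySem.List.pyRange lo (hi + 1) 1).map (pvCell n ∘ (· + r * n))
      = (PySem.List.pyRange lo (hi + 1) 1).map (fun c => max r c + 1) := by
    apply List.map_congr_left
    intro c hc
    rw [PySem.List.mem_pyRange_one] at hc
    exact cell_on_row n r c hn (by omega) (by omega)
  rw [hmapeq, rowRun r (hi + 1 - lo).toNat lo hi rfl]
  simp [pvRow, ← hlo, ← hhi]

lemma main_split (n : Int) (hn : 1 ≤ n) : ∀ (k : Nat) (left right : Int), left ≤ right →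
    (PySem.Int.floordiv right n - PySem.Int.floordiv left n).toNat = k →
    (PySem.List.pyRange left (right + 1) 1).map (pvCell n)
      = (PySem.List.pyRange (PySem.Int.floordiv left n) (PySem.Int.floordiv right n + 1) 1).flatMap
          (pvRow n left right (PySem.Int.floordiv left n) (PySem.Int.floordiv right n)) := by
  intro k
  induction k with
  | zero =>
    intro left right hlr hk
    set r0 := PySem.Int.floordiv left n with hr0
    set r1 := PySem.Int.floordiv right n with hr1
    have hble : r0 * n ≤ left ∧ left < (r0 + 1) * n := by
      rw [← PySem.Int.floordiv_eq_iff_of_pos (show (0:Int) < n by omega)]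
    have hbri : r1 * n ≤ right ∧ right < (r1 + 1) * n := by
      rw [← PySem.Int.floordiv_eq_iff_of_pos (show (0:Int) < n by omega)]
    have hr01 : r0 ≤ r1 := by
      by_contra hcon
      have hlt : r1 + 1 ≤ r0 := by omega
      have h2 : (r1 + 1) * n ≤ r0 * n := by nlinarith
      linarith [hble.1, hbri.2, h2, hlr]
    have heq : r1 = r0 := by omega
    rw [heq, PySem.List.pyRange_one_singleton, List.flatMap_cons, List.flatMap_nil,
        List.append_nil]
    have := rowPiece n left right r0 r0 r0 (left - r0 * n) (right - r0 * n) hn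
      (by simp) (by simp) (by omega) (by have h2 := hbri.2; rw [heq] at h2; nlinarith [h2])
    have e1 : left - r0 * n + r0 * n = left := by ring
    have e2 : right - r0 * n + 1 + r0 * n = right + 1 := by ring
    rw [e1, e2] at this
    exact this
  | succ k ih =>
    intro left right hlr hk
    set r0 := PySem.Int.floordiv left n with hr0
    set r1 := PySem.Int.floordiv right n with hr1
    have hble : r0 * n ≤ left ∧ left < (r0 + 1) * n := by
      rw [← PySem.Int.floordiv_eq_iff_of_pos (show (0:Int) < n by omega)]
    have hbri : r1 * n ≤ right ∧ right < (r1 + 1) * n := by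
      rw [← PySem.Int.floordiv_eq_iff_of_pos (show (0:Int) < n by omega)]
    have hr01 : r0 < r1 := by omega
    have hm1 : left < (r0 + 1) * n := hble.2
    have hm2 : (r0 + 1) * n ≤ right := le_trans (by nlinarith) hbri.1
    have hdm : PySem.Int.floordiv ((r0 + 1) * n) n = r0 + 1 := by
      rw [PySem.Int.floordiv_eq_iff_of_pos (by omega)]
      constructor
      · omega
      · nlinarith
    -- split the flat range at the start of row r0+1
    rw [PySem.List.pyRange_one_append left ((r0 + 1) * n) (right + 1) (by omega) (by omega),
        List.map_append]
    -- head: the (partial) first row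
    have hhead := rowPiece n left right r0 r1 r0 (left - r0 * n) (n - 1) hn
      (by simp) (by simp [show ¬ r0 = r1 by omega]) (by omega) (by omega)
    have e1 : left - r0 * n + r0 * n = left := by ring
    have e2 : n - 1 + 1 + r0 * n = (r0 + 1) * n := by ring
    rw [e1, e2] at hhead
    -- tail: induction hypothesis from the start of row r0+1
    have htail := ih ((r0 + 1) * n) right hm2 (by rw [hdm, ← hr1]; omega)
    rw [hdm] at htail
    rw [hhead, htail]
    -- rhs: peel off row r0
    rw [PySem.List.pyRange_one_cons (by omega : r0 < r1 + 1), List.flatMap_cons]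
    congr 1
    apply List.flatMap_congr
    intro r hr
    rw [PySem.List.mem_pyRange_one] at hr
    unfold pvRow
    have hne0 : ¬ r = r0 := by omega
    by_cases hcase : r = r0 + 1
    · subst hcase
      simp only [hne0, if_false]
      rw [← hr1]
      simp
    · simp only [hne0, hcase, if_false]
      rw [← hr1]

-- ===== VERDICT (by name: the statement is the Claim_ definition above) =====
theorem solution_spec : Claim_equal_solution := by
  intro n left right _ hpre
  unfold Spec_solution
  by_cases h : left ≤ right
  · have hn : 1 ≤ n := by unfold Pre_solution at hpre; omega
    rw [solutionA_eq_map, solutionB_eq_flatMap n left right h]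
    exact main_split n hn (PySem.Int.floordiv right n - PySem.Int.floordiv left n).toNat
      left right h rfl
  · unfold solution solution_alt
    rw [if_pos (by omega), PySem.List.pyRange_one_eq_nil (by omega)]
    rfl
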